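-- pv_equiv track=rewrite | github.com/danagle/everybody-codes-challenges | 2025-the-songs-of-ducks-and-dragons/quest07.py | count_recursive
-- ===== SOURCE A (Python) =====
-- from functools import cache
--
-- def count_recursive(prefixes, mapping):
--     @cache
--     def count(last_char, length):
--         if length > 11:
--             return 0
--         total = int(length >= 7)
--         for next_char in mapping.get(last_char, ()):
--             total += count(next_char, length + 1)
--         return total
--
--     return sum(count(prefix[-1], len(prefix)) for prefix in prefixes)
-- ===== SOURCE B (Python) =====
-- def count_recursive(prefixes, mapping):
--     # Bottom-up DP: tables[l][s] = number of ways to extend a sequence ending in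
--     # state s at length l, counting each intermediate length in 7..11 once.
--     universe = set(mapping)
--     for vals in mapping.values():
--         universe.update(vals)
--     universe.update(p[-1] for p in prefixes)
--     nxt = {s: 0 for s in universe}          # table for length 12
--     tables = {}
--     for l in range(11, -1, -1):
--         cur = {}
--         for s in universe:
--             t = 1 if l >= 7 else 0
--             for nc in mapping.get(s, ()):
--                 t += nxt[nc]
--             cur[s] = t
--         tables[l] = cur
--         nxt = cur
--     return sum(0 if len(p) > 11 else tables[len(p)][p[-1]] for p in prefixes)
-- ===== Notes on version B (the rewrite author's own statement) =====
-- stated objective: alternative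
-- what changed: Replaces A's top-down memoized recursion count(last_char, length) with a bottom-up DP that precomputes a value table per length from 11 down to 0 over the closed character universe, then sums table lookups for the prefixes.
import Mathlib
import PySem

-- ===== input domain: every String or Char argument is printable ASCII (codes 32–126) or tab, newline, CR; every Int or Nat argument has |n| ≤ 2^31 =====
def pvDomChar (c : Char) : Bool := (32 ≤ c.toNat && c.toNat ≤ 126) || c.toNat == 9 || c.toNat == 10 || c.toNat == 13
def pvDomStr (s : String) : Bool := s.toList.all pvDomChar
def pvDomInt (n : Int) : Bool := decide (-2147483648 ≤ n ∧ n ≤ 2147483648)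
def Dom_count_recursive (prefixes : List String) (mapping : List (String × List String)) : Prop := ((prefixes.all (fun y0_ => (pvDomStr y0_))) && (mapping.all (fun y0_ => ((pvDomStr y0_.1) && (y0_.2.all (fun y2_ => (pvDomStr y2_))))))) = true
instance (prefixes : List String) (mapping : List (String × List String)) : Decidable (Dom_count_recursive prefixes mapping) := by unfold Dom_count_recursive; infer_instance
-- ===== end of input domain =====

-- B replaces A's memoized recursion over (char, length) by a bottom-up DP that fills
-- per-length value tables from length 11 downwards (objective: alternative decomposition).
-- Shared dict primitive: Python's mapping.get(k, ()) — first match in the assoc list, default [].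
def pvGet (mapping : List (String × List String)) (k : String) : List String :=
  match mapping.find? (fun p => p.1 == k) with
  | some p => p.2
  | none => []

-- Python's prefix[-1] as a 1-character string; "" stands for the IndexError on an
-- empty string, which Pre_count_recursive excludes.
def pvLast (p : String) : String :=
  match PySem.List.pyGet? p.toList (-1) with
  | some c => String.ofList [c]
  | none => ""

-- ===== PORT A =====
-- the cached inner 'count' (the cache does not change the value); recursion bounded by 12 - length
def pvCountA (mapping : List (String × List String)) : String → Nat → Int
  | last_char, length =>
    if length > 11 then 0
    else
      (pvGet mapping last_char).foldl
        (fun total next_char => total + pvCountA mapping next_char (length + 1))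
        (if length ≥ 7 then 1 else 0)
  termination_by _ length => 12 - length
  decreasing_by simp_wf; omega

def count_recursive (prefixes : List String) (mapping : List (String × List String)) : Int :=
  prefixes.foldl (fun acc p => acc + pvCountA mapping (pvLast p) p.toList.length) 0

-- ===== PORT B =====
-- universe = set(mapping); for vals in mapping.values(): universe.update(vals); universe.update(p[-1] …)
def pvUniverse (prefixes : List String) (mapping : List (String × List String)) : PySem.Set String :=
  PySem.Set.update
    (mapping.foldl (fun s kv => PySem.Set.update s kv.2)
      (PySem.Set.ofList (mapping.map Prod.fst)))
    (prefixes.map pvLast)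

-- the tables dict: pvTbl mapping uni l is tables[l] (and pvTbl … 12 the initial nxt);
-- nxt[nc] is ported as getD nc 0 — exact, since every value string of mapping is in uni
def pvTbl (mapping : List (String × List String)) (uni : List String) : Nat → PySem.Dict String Int
  | l =>
    if l ≥ 12 then
      uni.foldl (fun d s => d.insert s 0) PySem.Dict.empty
    else
      let nxt := pvTbl mapping uni (l + 1)
      uni.foldl
        (fun cur s =>
          cur.insert s
            ((pvGet mapping s).foldl (fun t nc => t + nxt.getD nc 0)
              (if l ≥ 7 then 1 else 0)))
        PySem.Dict.empty
  termination_by l => 12 - l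
  decreasing_by simp_wf; omega

def count_recursive_alt (prefixes : List String) (mapping : List (String × List String)) : Int :=
  let uni := pvUniverse prefixes mapping
  prefixes.foldl
    (fun acc p =>
      acc + (if p.toList.length > 11 then 0
             else (pvTbl mapping uni p.toList.length).getD (pvLast p) 0))
    0

-- ===== PRECONDITION & SPEC =====
-- Pre_ excludes exactly the inputs with an empty prefix string, on which A raises IndexError at prefix[-1].
def Pre_count_recursive (prefixes : List String) (mapping : List (String × List String)) : Prop :=
  ∀ p ∈ prefixes, p ≠ ""
instance (prefixes : List String) (mapping : List (String × List String)) : Decidable (Pre_count_recursive prefixes mapping) := by unfold Pre_count_recursive; infer_instance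

def pvWitness_count_recursive : List String × (List (String × List String)) :=
  (["abcdefg"], [("g", ["a", "b"]), ("a", ["g"])])

def Spec_count_recursive (prefixes : List String) (mapping : List (String × List String)) (out : Int) : Prop := out = count_recursive_alt prefixes mapping
instance (prefixes : List String) (mapping : List (String × List String)) (out : Int) : Decidable (Spec_count_recursive prefixes mapping out) := by unfold Spec_count_recursive; infer_instance

-- ===== CLAIM (what is proved, stated in full; the proofs are below) =====
def Claim_equal_count_recursive : Prop := ∀ (prefixes : List String) (mapping : List (String × List String)), Dom_count_recursive prefixes mapping → Pre_count_recursive prefixes mapping → Spec_count_recursive prefixes mapping (count_recursive prefixes mapping)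

-- ===== LEMMAS AND PROOFS =====

-- an insert-loop does not change keys it never touches
theorem pv_getD_foldl_insert_not_mem (xs : List String) (g : String → Int)
    (d : PySem.Dict String Int) (s : String) (hs : s ∉ xs) :
    (xs.foldl (fun d x => d.insert x (g x)) d).getD s 0 = d.getD s 0 := by
  induction xs generalizing d with
  | nil => rfl
  | cons x xs ih =>
    simp only [List.foldl_cons]
    rw [ih _ (fun h => hs (List.mem_cons_of_mem _ h)),
        PySem.Dict.getD_insert_of_ne _ _ _ (fun h => hs (by subst h; exact List.mem_cons_self))]

-- an insert-loop writing g x at every key x reads back g s at any s it visited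
theorem pv_getD_foldl_insert_mem (xs : List String) (g : String → Int)
    (d : PySem.Dict String Int) (s : String) (hs : s ∈ xs) :
    (xs.foldl (fun d x => d.insert x (g x)) d).getD s 0 = g s := by
  induction xs generalizing d with
  | nil => cases hs
  | cons x xs ih =>
    simp only [List.foldl_cons]
    by_cases h : s ∈ xs
    · exact ih _ h
    · have hx : s = x := by rcases List.mem_cons.mp hs with h' | h' <;> [exact h'; exact absurd h' h]
      rw [pv_getD_foldl_insert_not_mem _ _ _ _ h, hx, PySem.Dict.getD_insert_self]

-- every string reachable through mapping.get lies in the universe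
-- membership is preserved by the update loop, and injected by the entry it reads
theorem pv_mem_foldl_update (l : List (String × List String)) (t : PySem.Set String)
    (nc : String) (h : nc ∈ t) :
    nc ∈ l.foldl (fun s kv => PySem.Set.update s kv.2) t := by
  induction l generalizing t with
  | nil => exact h
  | cons a as ih =>
    exact ih _ ((PySem.Set.mem_update _ _ _).mpr (Or.inl h))

theorem pv_mem_foldl_update_of_mem (l : List (String × List String))
    (t : PySem.Set String) (kv : String × List String) (nc : String)
    (hkv : kv ∈ l) (hnc : nc ∈ kv.2) :
    nc ∈ l.foldl (fun s kv => PySem.Set.update s kv.2) t := by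
  induction l generalizing t with
  | nil => cases hkv
  | cons a as ih =>
    simp only [List.foldl_cons]
    rcases List.mem_cons.mp hkv with h | h
    · exact pv_mem_foldl_update _ _ _ ((PySem.Set.mem_update _ _ _).mpr (Or.inr (h ▸ hnc)))
    · exact ih _ h

-- every string reachable through mapping.get lies in the universe
theorem pv_closure (prefixes : List String) (mapping : List (String × List String))
    (s nc : String) (hnc : nc ∈ pvGet mapping s) :
    nc ∈ pvUniverse prefixes mapping := by
  unfold pvUniverse
  refine (PySem.Set.mem_update _ _ _).mpr (Or.inl ?_)
  unfold pvGet at hnc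
  rcases hfind : mapping.find? (fun p => p.1 == s) with _ | kv
  · rw [hfind] at hnc; cases hnc
  · rw [hfind] at hnc
    exact pv_mem_foldl_update_of_mem _ _ _ _ (List.mem_of_find?_eq_some hfind) hnc

-- the DP table agrees with the recursion on every universe element
theorem pv_tbl_eq (prefixes : List String) (mapping : List (String × List String)) :
    ∀ (l : Nat) (s : String), s ∈ pvUniverse prefixes mapping →
      (pvTbl mapping (pvUniverse prefixes mapping) l).getD s 0 = pvCountA mapping s l := by
  intro l
  induction l using pvTbl.induct mapping (pvUniverse prefixes mapping) with
  | case1 x _l hx =>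
    intro s hs
    have hx' : x ≥ 12 := hx
    rw [pvTbl, if_pos hx', pv_getD_foldl_insert_mem _ (fun _ => 0) _ _ hs,
        pvCountA, if_pos (show x > 11 by omega)]
  | case2 x _l hx ih =>
    intro s hs
    have hx' : ¬ x ≥ 12 := hx
    have ih' : ∀ s ∈ pvUniverse prefixes mapping,
        (pvTbl mapping (pvUniverse prefixes mapping) (x + 1)).getD s 0
          = pvCountA mapping s (x + 1) := ih
    rw [pvTbl, if_neg hx']
    simp only []
    rw [pv_getD_foldl_insert_mem _
          (fun s => (pvGet mapping s).foldl
            (fun t nc => t + (pvTbl mapping (pvUniverse prefixes mapping) (x + 1)).getD nc 0)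
            (if x ≥ 7 then (1 : Int) else 0)) _ _ hs,
        pvCountA, if_neg (show ¬ x > 11 by omega)]
    exact PySem.List.foldl_congr_mem _ _ _ _
      (fun t nc hnc => by rw [ih' nc (pv_closure prefixes mapping s nc hnc)])

-- ===== VERDICT (by name: the statement is the Claim_ definition above) =====
theorem count_recursive_spec : Claim_equal_count_recursive := by
  intro prefixes mapping _ hpre
  unfold Spec_count_recursive count_recursive count_recursive_alt
  refine PySem.List.foldl_congr_mem _ _ _ _ ?_
  intro acc p hp
  congr 1
  by_cases hlen : p.toList.length > 11
  · rw [if_pos hlen, pvCountA, if_pos hlen]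
  · rw [if_neg hlen]
    refine (pv_tbl_eq prefixes mapping _ _ ?_).symm
    unfold pvUniverse
    exact (PySem.Set.mem_update _ _ _).mpr (Or.inr (List.mem_map_of_mem hp))
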